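-- pv_equiv track=rewrite | github.com/cotton-n/Algorithm | Line/22.py | solution
-- ===== SOURCE A (Python) =====
-- from itertools import combinations
--
-- def solution(answer_sheet, sheets):
--   answer = 0
--
--   people = [i for i in range(len(sheets))]
--
--   for p in combinations(people, 2):
--     count = 0
--     continuity = 0
--     temp = 0
--     for i, a in enumerate(answer_sheet):
--       if sheets[p[0]][i] == sheets[p[1]][i] and sheets[p[1]][i] != a:
--         count += 1
--         temp += 1
--       else:
--         continuity = max(temp, continuity)
--         temp = 0
--     continuity = max(temp, continuity)
--     answer = max(answer, count + continuity ** 2)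
--
--   return answer
-- ===== SOURCE B (Python) =====
-- def solution(answer_sheet, sheets):
--     m = len(answer_sheet)
--     best = 0
--     for a in range(len(sheets)):
--         for b in range(a + 1, len(sheets)):
--             bad = [i for i, x in enumerate(answer_sheet)
--                    if not (sheets[a][i] == sheets[b][i] and sheets[b][i] != x)]
--             bounds = [-1] + bad + [m]
--             continuity = max(u - t - 1 for t, u in zip(bounds, bounds[1:]))
--             best = max(best, (m - len(bad)) + continuity ** 2)
--     return best
-- ===== Notes on version B (the rewrite author's own statement) =====
-- stated objective: alternative
-- what changed: Per pair, A's fused streaming pass tracking count/continuity/temp is replaced by a boundary-gap method: collect the list of non-matching positions, derive the count by subtraction from the length, and obtain the longest matching run as the maximum gap between consecutive boundary positions (with sentinels -1 and len), with nested index ranges instead of itertools.combinations.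
import Mathlib
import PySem

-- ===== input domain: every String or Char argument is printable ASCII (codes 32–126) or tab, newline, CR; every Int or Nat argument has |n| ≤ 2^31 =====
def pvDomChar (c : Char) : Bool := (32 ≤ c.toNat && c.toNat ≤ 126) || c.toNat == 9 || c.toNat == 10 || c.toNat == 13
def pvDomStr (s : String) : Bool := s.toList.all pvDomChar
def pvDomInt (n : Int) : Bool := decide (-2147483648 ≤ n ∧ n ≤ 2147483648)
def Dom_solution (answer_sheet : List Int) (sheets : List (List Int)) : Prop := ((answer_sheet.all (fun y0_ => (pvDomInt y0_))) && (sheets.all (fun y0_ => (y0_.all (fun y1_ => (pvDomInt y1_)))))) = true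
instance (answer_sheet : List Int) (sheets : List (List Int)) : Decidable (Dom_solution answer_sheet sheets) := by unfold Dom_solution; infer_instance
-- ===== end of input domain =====

-- B replaces A's fused per-pair run-tracking pass by a boundary-gap method: collect the
-- non-matching positions, count by subtraction, longest run = max gap between consecutive
-- boundaries (sentinels -1 and len); objective: alternative algorithm, same asymptotic cost.

-- ===== PORT A =====
-- Python A: for p in combinations(range(len(sheets)), 2), one fused pass over enumerate(answer_sheet)
-- maintaining (count, continuity, temp); answer = max(answer, count + continuity**2).
def solution (answer_sheet : List Int) (sheets : List (List Int)) : Int :=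
  let people := PySem.List.pyRange 0 (sheets.length : Int) 1
  (PySem.List.combinations people 2).foldl
    (fun answer p =>
      let st := (PySem.List.enumerate answer_sheet 0).foldl
        (fun (acc : Int × Int × Int) ia =>
          if PySem.List.pyGetD (PySem.List.pyGetD sheets (PySem.List.pyGetD p 0 0) []) ia.1 0 =
               PySem.List.pyGetD (PySem.List.pyGetD sheets (PySem.List.pyGetD p 1 0) []) ia.1 0 ∧
             PySem.List.pyGetD (PySem.List.pyGetD sheets (PySem.List.pyGetD p 1 0) []) ia.1 0 ≠ ia.2
          then (acc.1 + 1, acc.2.1, acc.2.2 + 1)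
          else (acc.1, max acc.2.2 acc.2.1, 0))
        (0, 0, 0)
      let continuity := max st.2.2 st.2.1
      max answer (st.1 + continuity ^ 2))
    0

-- ===== PORT B =====
def solution_alt (answer_sheet : List Int) (sheets : List (List Int)) : Int :=
  let m := (answer_sheet.length : Int)
  (PySem.List.pyRange 0 (sheets.length : Int) 1).foldl
    (fun best a =>
      (PySem.List.pyRange (a + 1) (sheets.length : Int) 1).foldl
        (fun best b =>
          let bad := ((PySem.List.enumerate answer_sheet 0).filter
            (fun ix => !(decide (PySem.List.pyGetD (PySem.List.pyGetD sheets a []) ix.1 0 =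
                                   PySem.List.pyGetD (PySem.List.pyGetD sheets b []) ix.1 0 ∧
                                 PySem.List.pyGetD (PySem.List.pyGetD sheets b []) ix.1 0 ≠ ix.2)))).map (·.1)
          let bounds := (-1 : Int) :: (bad ++ [m])
          let continuity := PySem.List.maxD
            (List.zipWith (fun t u => u - t - 1) bounds (bounds.drop 1)) (fun x => x) 0
          max best ((m - (bad.length : Int)) + continuity ^ 2))
        best)
    0

-- ===== PRECONDITION & SPEC =====
-- Pre_ excludes exactly the inputs where Python A raises IndexError: two or more sheets
-- while some sheet is shorter than answer_sheet (B raises there too).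
def Pre_solution (answer_sheet : List Int) (sheets : List (List Int)) : Prop :=
  sheets.length < 2 ∨ ∀ s ∈ sheets, answer_sheet.length ≤ s.length
instance (answer_sheet : List Int) (sheets : List (List Int)) : Decidable (Pre_solution answer_sheet sheets) := by unfold Pre_solution; infer_instance

def pvWitness_solution : List Int × List (List Int) :=
  ([1, 2, 3], [[1, 1, 1], [2, 2, 2], [1, 1, 3]])

def Spec_solution (answer_sheet : List Int) (sheets : List (List Int)) (out : Int) : Prop := out = solution_alt answer_sheet sheets
instance (answer_sheet : List Int) (sheets : List (List Int)) (out : Int) : Decidable (Spec_solution answer_sheet sheets out) := by unfold Spec_solution; infer_instance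

-- ===== CLAIM (what is proved, stated in full; the proofs are below) =====
def Claim_equal_solution : Prop := ∀ (answer_sheet : List Int) (sheets : List (List Int)), Dom_solution answer_sheet sheets → Pre_solution answer_sheet sheets → Spec_solution answer_sheet sheets (solution answer_sheet sheets)

-- ===== LEMMAS AND PROOFS =====

-- longest run of Trues, with `t` the length of the run currently open (A's temp/continuity shape)
def hrun : Int → List Bool → Int
  | t, [] => t
  | t, true :: bs => hrun (t + 1) bs
  | t, false :: bs => max t (hrun 0 bs)

-- positions (from `base`) of the false entries of a mask
def gIdx : Int → List Bool → List Int
  | _, [] => []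
  | base, true :: bs => gIdx (base + 1) bs
  | base, false :: bs => base :: gIdx (base + 1) bs

lemma hrun_nonneg (bs : List Bool) : ∀ t : Int, 0 ≤ t → 0 ≤ hrun t bs := by
  induction bs with
  | nil => intro t ht; simpa [hrun] using ht
  | cons b bs ih =>
    intro t ht
    cases b with
    | true => exact ih (t + 1) (by omega)
    | false => simp only [hrun]; have := ih 0 le_rfl; omega

-- A's fused loop, characterised: first component counts the Trues, and the final
-- max(temp, continuity) is max of the incoming continuity and hrun.
lemma loop_core (bs : List Bool) : ∀ c k t : Int,
    (bs.foldl
      (fun (acc : Int × Int × Int) m =>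
        if m then (acc.1 + 1, acc.2.1, acc.2.2 + 1) else (acc.1, max acc.2.2 acc.2.1, 0))
      (c, k, t)).1 = c + (bs.countP id : Int) ∧
    max (bs.foldl
      (fun (acc : Int × Int × Int) m =>
        if m then (acc.1 + 1, acc.2.1, acc.2.2 + 1) else (acc.1, max acc.2.2 acc.2.1, 0))
      (c, k, t)).2.2
      (bs.foldl
      (fun (acc : Int × Int × Int) m =>
        if m then (acc.1 + 1, acc.2.1, acc.2.2 + 1) else (acc.1, max acc.2.2 acc.2.1, 0))
      (c, k, t)).2.1 = max k (hrun t bs) := by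
  induction bs with
  | nil => intro c k t; simp [hrun, max_comm]
  | cons b bs ih =>
    intro c k t
    cases b with
    | true =>
      have h := ih (c + 1) k (t + 1)
      have hcnt : ((true :: bs).countP id : Int) = (bs.countP id : Int) + 1 := by
        simp
      simp only [List.foldl_cons, if_true]
      rw [hcnt]
      refine ⟨by rw [h.1]; ring, ?_⟩
      rw [h.2]; rfl
    | false =>
      have h := ih c (max t k) 0
      have hcnt : ((false :: bs).countP id : Int) = (bs.countP id : Int) := by
        simp
      simp only [List.foldl_cons, Bool.false_eq_true, if_false]
      rw [hcnt]
      refine ⟨h.1, ?_⟩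
      rw [h.2]
      simp only [hrun]
      omega

lemma foldl_max_max (t : List Int) : ∀ x y : Int, t.foldl max (max x y) = max x (t.foldl max y) := by
  induction t with
  | nil => intro x y; rfl
  | cons z t ih =>
    intro x y
    simp only [List.foldl_cons]
    rw [max_assoc, ih]

lemma maxD_cons_ne (x : Int) (xs : List Int) (hx : xs ≠ []) :
    PySem.List.maxD (x :: xs) (fun y => y) 0 = max x (PySem.List.maxD xs (fun y => y) 0) := by
  cases xs with
  | nil => exact absurd rfl hx
  | cons y t =>
    simp only [PySem.List.maxD, PySem.List.max?_id_cons, Option.getD_some]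
    exact foldl_max_max t x y

-- the bad-position filter of B equals gIdx over the mask
lemma filter_eq_gIdx (P : Int × Int → Bool) (l : List Int) : ∀ base : Int,
    ((PySem.List.enumerate l base).filter (fun ix => !(P ix))).map (·.1)
      = gIdx base ((PySem.List.enumerate l base).map P) := by
  induction l with
  | nil => intro base; simp [PySem.List.enumerate_nil, gIdx]
  | cons x xs ih =>
    intro base
    rw [PySem.List.enumerate_cons]
    cases h : P (base, x) with
    | true => simp [h, gIdx, ih (base + 1)]
    | false => simp [h, gIdx, ih (base + 1)]

lemma gIdx_length (bs : List Bool) : ∀ base : Int,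
    (gIdx base bs).length = bs.countP (fun b => !b) := by
  induction bs with
  | nil => intro base; simp [gIdx]
  | cons b bs ih =>
    intro base
    cases b with
    | true => simp [gIdx, ih]
    | false => simp [gIdx, ih]

-- the gap maximum over the sentinel-bounded bad positions is exactly hrun
lemma gaps_eq_hrun (bs : List Bool) : ∀ base prev : Int, prev ≤ base - 1 →
    PySem.List.maxD
      (List.zipWith (fun t u => u - t - 1)
        (prev :: (gIdx base bs ++ [base + (bs.length : Int)]))
        ((prev :: (gIdx base bs ++ [base + (bs.length : Int)])).drop 1))
      (fun x => x) 0
    = hrun (base - prev - 1) bs := by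
  induction bs with
  | nil =>
    intro base prev hp
    simp [gIdx, hrun, PySem.List.maxD, PySem.List.max?_id_cons]
  | cons b bs ih =>
    intro base prev hp
    cases b with
    | true =>
      have h := ih (base + 1) prev (by omega)
      simp only [gIdx, List.length_cons, hrun]
      have harith : base + ((bs.length : Int) + 1) = (base + 1) + (bs.length : Int) := by ring
      push_cast
      rw [harith, h]
      congr 1
      omega
    | false =>
      simp only [gIdx, List.cons_append, List.length_cons, hrun]
      have hne : List.zipWith (fun t u => u - t - 1)
          (base :: (gIdx (base + 1) bs ++ [(base + 1) + (bs.length : Int)]))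
          ((base :: (gIdx (base + 1) bs ++ [(base + 1) + (bs.length : Int)])).drop 1) ≠ [] := by
        cases hg : gIdx (base + 1) bs with
        | nil => simp
        | cons z t => simp
      have h := ih (base + 1) base (by omega)
      have harith : base + ((bs.length : Int) + 1) = (base + 1) + (bs.length : Int) := by ring
      push_cast
      rw [harith]
      have hzip : List.zipWith (fun t u => u - t - 1)
          (prev :: base :: (gIdx (base + 1) bs ++ [(base + 1) + (bs.length : Int)]))
          ((prev :: base :: (gIdx (base + 1) bs ++ [(base + 1) + (bs.length : Int)])).drop 1)
          = (base - prev - 1) ::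
            List.zipWith (fun t u => u - t - 1)
              (base :: (gIdx (base + 1) bs ++ [(base + 1) + (bs.length : Int)]))
              ((base :: (gIdx (base + 1) bs ++ [(base + 1) + (bs.length : Int)])).drop 1) := by
        simp
      rw [hzip, maxD_cons_ne _ _ hne, h]
      have h0 : (base + 1) - base - 1 = 0 := by ring
      rw [h0]

-- per-pair score as A computes it (the fused fold)
def scoreA (answer_sheet : List Int) (sheets : List (List Int)) (a b : Int) : Int :=
  let st := (PySem.List.enumerate answer_sheet 0).foldl
      (fun (acc : Int × Int × Int) ia =>
        if PySem.List.pyGetD (PySem.List.pyGetD sheets a []) ia.1 0 =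
             PySem.List.pyGetD (PySem.List.pyGetD sheets b []) ia.1 0 ∧
           PySem.List.pyGetD (PySem.List.pyGetD sheets b []) ia.1 0 ≠ ia.2
        then (acc.1 + 1, acc.2.1, acc.2.2 + 1)
        else (acc.1, max acc.2.2 acc.2.1, 0))
      (0, 0, 0)
  st.1 + (max st.2.2 st.2.1) ^ 2

-- per-pair score as B computes it (boundary gaps)
def scoreB (answer_sheet : List Int) (sheets : List (List Int)) (a b : Int) : Int :=
  let m := (answer_sheet.length : Int)
  let bad := ((PySem.List.enumerate answer_sheet 0).filter
    (fun ix => !(decide (PySem.List.pyGetD (PySem.List.pyGetD sheets a []) ix.1 0 =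
                           PySem.List.pyGetD (PySem.List.pyGetD sheets b []) ix.1 0 ∧
                         PySem.List.pyGetD (PySem.List.pyGetD sheets b []) ix.1 0 ≠ ix.2)))).map (·.1)
  let bounds := (-1 : Int) :: (bad ++ [m])
  let continuity := PySem.List.maxD
    (List.zipWith (fun t u => u - t - 1) bounds (bounds.drop 1)) (fun x => x) 0
  (m - (bad.length : Int)) + continuity ^ 2

lemma body_eq (answer_sheet : List Int) (sheets : List (List Int)) (a b : Int) :
    scoreA answer_sheet sheets a b = scoreB answer_sheet sheets a b := by
  have hfold : (PySem.List.enumerate answer_sheet 0).foldl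
        (fun (acc : Int × Int × Int) ia =>
          if PySem.List.pyGetD (PySem.List.pyGetD sheets a []) ia.1 0 =
               PySem.List.pyGetD (PySem.List.pyGetD sheets b []) ia.1 0 ∧
             PySem.List.pyGetD (PySem.List.pyGetD sheets b []) ia.1 0 ≠ ia.2
          then (acc.1 + 1, acc.2.1, acc.2.2 + 1)
          else (acc.1, max acc.2.2 acc.2.1, 0))
        (0, 0, 0) =
      ((PySem.List.enumerate answer_sheet 0).map
        (fun ix => decide (PySem.List.pyGetD (PySem.List.pyGetD sheets a []) ix.1 0 =
                             PySem.List.pyGetD (PySem.List.pyGetD sheets b []) ix.1 0 ∧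
                           PySem.List.pyGetD (PySem.List.pyGetD sheets b []) ix.1 0 ≠ ix.2))).foldl
        (fun (acc : Int × Int × Int) m =>
          if m then (acc.1 + 1, acc.2.1, acc.2.2 + 1) else (acc.1, max acc.2.2 acc.2.1, 0))
        (0, 0, 0) := by
    rw [List.foldl_map]
    simp
  have hbad : ((PySem.List.enumerate answer_sheet 0).filter
        (fun ix => !(decide (PySem.List.pyGetD (PySem.List.pyGetD sheets a []) ix.1 0 =
                               PySem.List.pyGetD (PySem.List.pyGetD sheets b []) ix.1 0 ∧
                             PySem.List.pyGetD (PySem.List.pyGetD sheets b []) ix.1 0 ≠ ix.2)))).map (·.1)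
      = gIdx 0 ((PySem.List.enumerate answer_sheet 0).map
        (fun ix => decide (PySem.List.pyGetD (PySem.List.pyGetD sheets a []) ix.1 0 =
                             PySem.List.pyGetD (PySem.List.pyGetD sheets b []) ix.1 0 ∧
                           PySem.List.pyGetD (PySem.List.pyGetD sheets b []) ix.1 0 ≠ ix.2))) :=
    filter_eq_gIdx _ answer_sheet 0
  simp only [scoreA, scoreB, hfold]
  rw [hbad]
  set mask := (PySem.List.enumerate answer_sheet 0).map
    (fun ix => decide (PySem.List.pyGetD (PySem.List.pyGetD sheets a []) ix.1 0 =
                         PySem.List.pyGetD (PySem.List.pyGetD sheets b []) ix.1 0 ∧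
                       PySem.List.pyGetD (PySem.List.pyGetD sheets b []) ix.1 0 ≠ ix.2)) with hmask
  have hc := loop_core mask 0 0 0
  rw [hc.1, hc.2]
  have hlen : (answer_sheet.length : Int) = (mask.length : Int) := by
    simp [hmask, PySem.List.length_enumerate]
  rw [hlen]
  have hgaps := gaps_eq_hrun mask 0 (-1) (by omega)
  have hz : (0 : Int) + (mask.length : Int) = (mask.length : Int) := by ring
  rw [hz] at hgaps
  have h01 : (0 : Int) - (-1) - 1 = 0 := by ring
  rw [h01] at hgaps
  rw [hgaps]
  have hcl : ((gIdx 0 mask).length : Int) = (mask.countP (fun b => !b) : Int) := by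
    rw [gIdx_length mask 0]
  rw [hcl]
  have hcnt : (mask.countP id : Int) + (mask.countP (fun b => !b) : Int) = (mask.length : Int) := by
    have := List.length_eq_countP_add_countP (p := id) (l := mask)
    have hco : mask.countP (fun b => !b) = mask.countP (fun b => ¬ (id b = true)) := by
      apply List.countP_congr
      intro x _
      cases x <;> simp
    omega
  have hmax : max (0 : Int) (hrun 0 mask) = hrun 0 mask := by
    have := hrun_nonneg mask 0 le_rfl
    omega
  rw [hmax]
  omega

-- outer iteration: foldl over combinations(range,2) = the nested range folds
lemma combos_fold (n : Int) (g : Int → Int → Int → Int) :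
    ∀ (m : Nat) (a : Int), (n - a).toNat = m → ∀ init : Int,
    (PySem.List.combinations (PySem.List.pyRange a n 1) 2).foldl
        (fun ans p => g ans (PySem.List.pyGetD p 0 0) (PySem.List.pyGetD p 1 0)) init =
    (PySem.List.pyRange a n 1).foldl
        (fun ans x => (PySem.List.pyRange (x + 1) n 1).foldl (fun ans2 y => g ans2 x y) ans) init := by
  intro m
  induction m with
  | zero =>
    intro a ha init
    rw [PySem.List.pyRange_one_eq_nil (by omega)]
    rfl
  | succ m ih =>
    intro a ha init
    have hlt : a < n := by omega
    rw [PySem.List.pyRange_one_cons hlt]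
    rw [PySem.List.combinations_cons_succ, PySem.List.combinations_one]
    rw [List.foldl_append, List.foldl_map, List.foldl_map]
    simp only [List.foldl_cons]
    rw [ih (a + 1) (by omega)]
    have h0 : ∀ x y : Int, PySem.List.pyGetD [x, y] (0 : Int) 0 = x := fun x y => rfl
    have h1 : ∀ x y : Int, PySem.List.pyGetD [x, y] (1 : Int) 0 = y := fun x y => rfl
    simp only [h0, h1]

-- ===== VERDICT (by name: the statement is the Claim_ definition above) =====
theorem solution_spec : Claim_equal_solution := by
  intro answer_sheet sheets _ _
  show solution answer_sheet sheets = solution_alt answer_sheet sheets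
  have e1 : solution answer_sheet sheets =
      (PySem.List.combinations (PySem.List.pyRange 0 (sheets.length : Int) 1) 2).foldl
        (fun ans p => max ans (scoreA answer_sheet sheets (PySem.List.pyGetD p 0 0) (PySem.List.pyGetD p 1 0))) 0 := rfl
  have e2 : solution_alt answer_sheet sheets =
      (PySem.List.pyRange 0 (sheets.length : Int) 1).foldl
        (fun ans a => (PySem.List.pyRange (a + 1) (sheets.length : Int) 1).foldl
          (fun ans2 b => max ans2 (scoreB answer_sheet sheets a b)) ans) 0 := rfl
  rw [e1, e2,
    ← combos_fold (sheets.length : Int) (fun ans x y => max ans (scoreB answer_sheet sheets x y))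
      ((sheets.length : Int) - 0).toNat 0 rfl 0]
  congr 1
  funext ans p
  rw [body_eq]
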